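-- pv_equiv track=rewrite | github.com/Rpratik13/Blocks-World | input.py | parse
-- ===== SOURCE A (Python) =====
-- def parse(inp):
--     state = []
--
--     for i in inp:
--         for j in range(len(i)):
--             if j == 0:
--                 state.append(["clear", i[j]])
--
--             if j == len(i) - 1:
--                 state.append(["on", i[j], "table"])
--                 continue
--
--             state.append(["on", i[j], i[j + 1]])
--
--     return f"[[{'], ['.join(map(lambda x: ', '.join(x), state))}]]"
-- ===== SOURCE B (Python) =====
-- def parse(inp):
--     def chain(s):
--         if len(s) == 1:
--             return f"on, {s[0]}, table"
--         return f"on, {s[0]}, {s[1]}], [" + chain(s[1:])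
--     return "[[" + "], [".join(f"clear, {s[0]}], [" + chain(s) for s in inp if s) + "]]"
-- ===== Notes on version B (the rewrite author's own statement) =====
-- stated objective: alternative
-- what changed: B builds the output string directly by structural recursion on each stack (a recursive chain function emits the 'on' facts with the '], [' separators inline, preceded by the 'clear' fact), never materializing A's intermediate list of predicate lists nor its final map/join formatting pass.
import Mathlib
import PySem

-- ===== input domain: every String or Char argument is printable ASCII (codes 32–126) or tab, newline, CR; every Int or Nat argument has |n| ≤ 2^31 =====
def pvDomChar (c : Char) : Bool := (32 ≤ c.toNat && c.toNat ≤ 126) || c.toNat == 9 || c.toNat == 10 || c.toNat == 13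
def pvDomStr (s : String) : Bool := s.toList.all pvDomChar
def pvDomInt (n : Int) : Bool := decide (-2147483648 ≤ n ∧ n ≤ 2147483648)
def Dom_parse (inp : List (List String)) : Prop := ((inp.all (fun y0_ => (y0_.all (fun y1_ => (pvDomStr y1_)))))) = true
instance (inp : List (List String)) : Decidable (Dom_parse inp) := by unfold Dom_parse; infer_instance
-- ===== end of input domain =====

-- B builds the output string directly by structural recursion on each stack (separators inline),
-- with no intermediate predicate list and no final map/join pass: an alternative decomposition.


-- ===== PORT A =====
-- inner body for index j; i[j] is read with List.getD — exact here since j, j+1 are only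
-- read at indices < i.length (j comes from range(len(i)) and the j = len-1 case 'continue's)
def parseInner (i : List String) (st : List (List String)) (j : Nat) : List (List String) :=
  let st := if j = 0 then st ++ [["clear", i.getD j ""]] else st
  if j = i.length - 1 then st ++ [["on", i.getD j "", "table"]]
  else st ++ [["on", i.getD j "", i.getD (j + 1) ""]]

def parse (inp : List (List String)) : String :=
  let state := inp.foldl (fun st i => (List.range i.length).foldl (parseInner i) st) []
  "[[" ++ PySem.Str.join "], [" (state.map (fun x => PySem.Str.join ", " x)) ++ "]]"

-- ===== PORT B =====
-- chain(s) of Source B: the 'on' facts of one nonempty stack, separators built inline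
def chainB : List String → String
  | [] => ""            -- unreachable: chain is only called on nonempty stacks
  | [x] => "on, " ++ x ++ ", table"
  | x :: y :: rest => "on, " ++ x ++ ", " ++ y ++ "], [" ++ chainB (y :: rest)

def parse_alt (inp : List (List String)) : String :=
  "[[" ++ PySem.Str.join "], ["
      ((inp.filter (fun s => !s.isEmpty)).map
        (fun s => "clear, " ++ s.headD "" ++ "], [" ++ chainB s)) ++ "]]"

-- ===== PRECONDITION & SPEC =====
def Spec_parse (inp : List (List String)) (out : String) : Prop := out = parse_alt inp
instance (inp : List (List String)) (out : String) : Decidable (Spec_parse inp out) := by unfold Spec_parse; infer_instance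

-- ===== CLAIM (what is proved, stated in full; the proofs are below) =====
def Claim_equal_parse : Prop := ∀ (inp : List (List String)), Dom_parse inp → Spec_parse inp (parse inp)

-- ===== LEMMAS AND PROOFS =====

-- ---- A-side characterisation: the state list is a flatMap of per-stack predicate lists ----

-- the chunk A's inner body appends at index j
def chunkA (i : List String) (j : Nat) : List (List String) :=
  (if j = 0 then [["clear", i.getD j ""]] else [])
    ++ (if j = i.length - 1 then [["on", i.getD j "", "table"]]
        else [["on", i.getD j "", i.getD (j + 1) ""]])

lemma parseInner_eq (i : List String) (st : List (List String)) (j : Nat) :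
    parseInner i st j = st ++ chunkA i j := by
  unfold parseInner chunkA
  split_ifs <;> simp

-- the 'on' part of chunkA (no clear fact)
def chunkOn (i : List String) (j : Nat) : List (List String) :=
  if j = i.length - 1 then [["on", i.getD j "", "table"]]
  else [["on", i.getD j "", i.getD (j + 1) ""]]

-- the 'on' facts of a nonempty stack x :: r, recursively (mirrors chainB's recursion)
def onPr (x : String) (r : List String) : List (List String) :=
  match r with
  | [] => [["on", x, "table"]]
  | y :: t => ["on", x, y] :: onPr y t

-- all predicates A emits for one stack
def stackPreds (s : List String) : List (List String) :=
  match s with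
  | [] => []
  | x :: r => ["clear", x] :: onPr x r

lemma onPr_ne_nil (x : String) (r : List String) : onPr x r ≠ [] := by
  cases r <;> simp [onPr]

lemma chunkOn_shift (x : String) (r : List String) (hr : r ≠ []) (j : Nat) :
    chunkOn (x :: r) (j + 1) = chunkOn r j := by
  have hlen : (x :: r).length - 1 = r.length := by simp
  have : (j + 1 = (x :: r).length - 1) ↔ (j = r.length - 1) := by
    rw [hlen]
    cases r with
    | nil => exact absurd rfl hr
    | cons y t => simp
  simp only [chunkOn, this]
  split <;> simp [List.getD]

lemma onpart (r : List String) : ∀ (x : String),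
    (List.range (x :: r).length).flatMap (chunkOn (x :: r)) = onPr x r := by
  induction r with
  | nil =>
      intro x
      simp [chunkOn, onPr, List.getD]
  | cons y t ih =>
      intro x
      have hcons : List.range (x :: y :: t).length
          = 0 :: (List.range (y :: t).length).map Nat.succ := by
        simp [List.range_succ_eq_map]
      rw [hcons, List.flatMap_cons, List.flatMap_map]
      have : (List.range (y :: t).length).flatMap (fun j => chunkOn (x :: y :: t) (Nat.succ j))
          = (List.range (y :: t).length).flatMap (chunkOn (y :: t)) :=
        List.flatMap_congr (fun j _ => chunkOn_shift x (y :: t) (List.cons_ne_nil y t) j)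
      rw [this, ih y]
      have h0 : chunkOn (x :: y :: t) 0 = [["on", x, y]] := by
        simp [chunkOn, List.getD]
      rw [h0]
      simp [onPr]

lemma stack_eq (s : List String) :
    (List.range s.length).flatMap (chunkA s) = stackPreds s := by
  cases s with
  | nil => simp [stackPreds]
  | cons x r =>
      have hcons : List.range (x :: r).length
          = 0 :: (List.range r.length).map Nat.succ := by
        simp [List.range_succ_eq_map]
      rw [hcons, List.flatMap_cons, List.flatMap_map]
      have hclear : chunkA (x :: r) 0 = ["clear", x] :: chunkOn (x :: r) 0 := by
        simp [chunkA, chunkOn, List.getD]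
      have hsh : (List.range r.length).flatMap (fun j => chunkA (x :: r) (Nat.succ j))
          = (List.range r.length).flatMap (fun j => chunkOn (x :: r) (Nat.succ j)) := by
        refine List.flatMap_congr (fun j _ => ?_)
        simp [chunkA, chunkOn]
      rw [hclear, hsh]
      cases r with
      | nil => simp [chunkOn, onPr, stackPreds, List.getD]
      | cons y t =>
          have hsh2 : (List.range (y :: t).length).flatMap (fun j => chunkOn (x :: y :: t) (Nat.succ j))
              = (List.range (y :: t).length).flatMap (chunkOn (y :: t)) :=
            List.flatMap_congr (fun j _ => chunkOn_shift x (y :: t) (List.cons_ne_nil y t) j)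
          rw [hsh2, onpart t y]
          have h0 : chunkOn (x :: y :: t) 0 = [["on", x, y]] := by
            simp [chunkOn, List.getD]
          rw [h0]
          simp [stackPreds, onPr]

lemma state_eq (inp : List (List String)) :
    inp.foldl (fun st i => (List.range i.length).foldl (parseInner i) st) []
      = inp.flatMap stackPreds := by
  have h : inp.foldl (fun st i => (List.range i.length).foldl (parseInner i) st) []
      = inp.foldl (fun st i => st ++ stackPreds i) [] := by
    refine PySem.List.foldl_congr_mem _ _ _ _ (fun st s _ => ?_)
    have hA : (List.range s.length).foldl (parseInner s) st
        = st ++ (List.range s.length).flatMap (chunkA s) := by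
      rw [PySem.List.foldl_congr_mem _ _ (fun acc j => acc ++ chunkA s j) _
        (fun acc j _ => parseInner_eq s acc j)]
      exact PySem.List.foldl_append_eq_flatMap _ _ _
    rw [hA, stack_eq]
  rw [h]
  exact PySem.List.foldl_append_eq_flatMap _ _ _

-- ---- chars side: B's recursive string equals A's join of the per-stack predicate list ----

-- the char-list of one predicate rendered by A's inner ', '.join
def predChars (p : List String) : List Char :=
  PySem.Chars.join (", " : String).toList (p.map String.toList)

lemma join_append (sep : List Char) :
    ∀ (g l : List (List Char)), g ≠ [] → l ≠ [] →
    PySem.Chars.join sep (g ++ l)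
      = PySem.Chars.join sep g ++ sep ++ PySem.Chars.join sep l := by
  intro g
  induction g with
  | nil => intro l h _; exact absurd rfl h
  | cons a g ih =>
      intro l _ hl
      cases g with
      | nil =>
          cases l with
          | nil => exact absurd rfl hl
          | cons b t =>
              simp [PySem.Chars.join_cons_cons, PySem.Chars.join_singleton]
      | cons b g' =>
          rw [List.cons_append, List.cons_append, PySem.Chars.join_cons_cons,
            ← List.cons_append, ih l (List.cons_ne_nil b g') hl,
            PySem.Chars.join_cons_cons]
          simp

lemma join_groups (sep : List Char) :
    ∀ (gss : List (List (List Char))), (∀ g ∈ gss, g ≠ []) →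
    PySem.Chars.join sep (gss.map (PySem.Chars.join sep))
      = PySem.Chars.join sep gss.flatten := by
  intro gss
  induction gss with
  | nil => intro _; simp
  | cons g rest ih =>
      intro h
      have hg : g ≠ [] := h g (by simp)
      cases rest with
      | nil => simp [PySem.Chars.join_singleton]
      | cons g2 t =>
          have hg2 : g2 ≠ [] := h g2 (by simp)
          rw [List.map_cons, List.map_cons, PySem.Chars.join_cons_cons,
            show (PySem.Chars.join sep g2 :: List.map (PySem.Chars.join sep) t)
              = List.map (PySem.Chars.join sep) (g2 :: t) from rfl,
            ih (fun x hx => h x (by simp [hx]))]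
          conv_rhs => rw [List.flatten_cons]
          rw [join_append sep g ((g2 :: t).flatten) hg (by
              cases g2 with
              | nil => exact absurd rfl hg2
              | cons a t2 => simp),
            List.flatten_cons]

lemma chain_chars : ∀ (r : List String) (x : String),
    (chainB (x :: r)).toList
      = PySem.Chars.join ("], [" : String).toList ((onPr x r).map predChars) := by
  intro r
  induction r with
  | nil =>
      intro x
      show (("on, " ++ x ++ ", table" : String)).toList
          = PySem.Chars.join ("], [" : String).toList [predChars ["on", x, "table"]]
      rw [PySem.Chars.join_singleton]
      simp [predChars, PySem.Chars.join_cons_cons, PySem.Chars.join_singleton]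
  | cons y t ih =>
      intro x
      have hmap : (onPr x (y :: t)).map predChars
          = predChars ["on", x, y] :: (onPr y t).map predChars := rfl
      rw [show chainB (x :: y :: t)
          = "on, " ++ x ++ ", " ++ y ++ "], [" ++ chainB (y :: t) from rfl, hmap]
      rcases h : onPr y t with _ | ⟨p, ps⟩
      · exact absurd h (onPr_ne_nil y t)
      · rw [List.map_cons, PySem.Chars.join_cons_cons, ← List.map_cons, ← h, ← ih y]
        simp [predChars, PySem.Chars.join_cons_cons, PySem.Chars.join_singleton]

lemma stack_chars (x : String) (r : List String) :
    PySem.Chars.join ("], [" : String).toList ((stackPreds (x :: r)).map predChars)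
      = ("clear, " ++ x ++ "], [" ++ chainB (x :: r)).toList := by
  have hmap : (stackPreds (x :: r)).map predChars
      = predChars ["clear", x] :: (onPr x r).map predChars := rfl
  rw [hmap]
  rcases h : onPr x r with _ | ⟨p, ps⟩
  · exact absurd h (onPr_ne_nil x r)
  · rw [List.map_cons, PySem.Chars.join_cons_cons, ← List.map_cons, ← h, ← chain_chars r x]
    simp [predChars, PySem.Chars.join_cons_cons, PySem.Chars.join_singleton]

lemma flatMap_filter_stackPreds (inp : List (List String)) :
    inp.flatMap stackPreds = (inp.filter (fun s => !s.isEmpty)).flatMap stackPreds := by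
  induction inp with
  | nil => rfl
  | cons s rest ih =>
      cases s with
      | nil => simpa [stackPreds, List.filter] using ih
      | cons x r => simp [List.filter, List.flatMap_cons, ih]

lemma stackPreds_ne_nil (s : List String) (hs : s ≠ []) : stackPreds s ≠ [] := by
  cases s with
  | nil => exact absurd rfl hs
  | cons x r => simp [stackPreds]

-- the central join equality, at the char-list level
lemma join_eq (F : List (List String)) (hF : ∀ s ∈ F, s ≠ []) :
    PySem.Chars.join ("], [" : String).toList ((F.flatMap stackPreds).map predChars)
      = PySem.Chars.join ("], [" : String).toList
          (F.map (fun s => ("clear, " ++ s.headD "" ++ "], [" ++ chainB s).toList)) := by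
  have h1 : F.map (fun s => ("clear, " ++ s.headD "" ++ "], [" ++ chainB s).toList)
      = F.map (fun s => PySem.Chars.join ("], [" : String).toList ((stackPreds s).map predChars)) := by
    refine List.map_congr_left (fun s hs => ?_)
    rcases s with _ | ⟨x, r⟩
    · exact absurd rfl (hF _ hs)
    · simpa using (stack_chars x r).symm
  rw [h1,
    show (fun s => PySem.Chars.join ("], [" : String).toList ((stackPreds s).map predChars))
      = (PySem.Chars.join ("], [" : String).toList) ∘ (fun s => (stackPreds s).map predChars)
      from rfl,
    ← List.map_map,
    join_groups _ _ (by
      intro g hg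
      obtain ⟨s, hs, rfl⟩ := List.mem_map.mp hg
      simpa using stackPreds_ne_nil s (hF s hs))]
  rw [List.map_flatMap, List.flatMap_def]

-- ===== VERDICT (by name: the statement is the Claim_ definition above) =====
theorem parse_spec : Claim_equal_parse := by
  intro inp _
  unfold Spec_parse
  show "[[" ++ PySem.Str.join "], ["
      ((inp.foldl (fun st i => (List.range i.length).foldl (parseInner i) st) []).map
        (fun x => PySem.Str.join ", " x)) ++ "]]" = parse_alt inp
  unfold parse_alt
  rw [state_eq, flatMap_filter_stackPreds]
  have hF : ∀ s ∈ inp.filter (fun s => !s.isEmpty), s ≠ [] := by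
    intro s hs
    have := List.of_mem_filter hs
    simpa using this
  congr 2
  refine String.toList_inj.mp ?_
  rw [PySem.Str.toList_join, PySem.Str.toList_join, List.map_map, List.map_map]
  have hpred : (String.toList ∘ fun x : List String => PySem.Str.join ", " x) = predChars := by
    funext p
    show (PySem.Str.join ", " p).toList = predChars p
    rw [PySem.Str.toList_join]
    rfl
  rw [hpred]
  exact join_eq _ hF
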